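-- pv_equiv track=rewrite | github.com/ajnirp/binarysearch | number-triple.py | solve
-- ===== SOURCE A (Python) =====
-- from collections import Counter
--
-- def solve(nums):
--     count = Counter(nums)
--     for n in count:
--         if n == 0:
--             if count[0] > 1:
--                 return True
--         elif 3*n in count:
--             return True
--     return False
-- ===== SOURCE B (Python) =====
-- def solve(nums):
--     seen = set()
--     triples = set()
--     for x in nums:
--         if x in triples or 3 * x in seen:
--             return True
--         seen.add(x)
--         triples.add(3 * x)
--     return False
-- ===== Notes on version B (the rewrite author's own statement) =====
-- stated objective: faster
-- what changed: Replaced the Counter-then-scan-all-distinct-keys approach by a single online pass that maintains a 'seen' set and a 'triples' (3*each seen) set and returns as soon as a triple pair is witnessed, so B can stop early and never builds the full Counter.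
import Mathlib
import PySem

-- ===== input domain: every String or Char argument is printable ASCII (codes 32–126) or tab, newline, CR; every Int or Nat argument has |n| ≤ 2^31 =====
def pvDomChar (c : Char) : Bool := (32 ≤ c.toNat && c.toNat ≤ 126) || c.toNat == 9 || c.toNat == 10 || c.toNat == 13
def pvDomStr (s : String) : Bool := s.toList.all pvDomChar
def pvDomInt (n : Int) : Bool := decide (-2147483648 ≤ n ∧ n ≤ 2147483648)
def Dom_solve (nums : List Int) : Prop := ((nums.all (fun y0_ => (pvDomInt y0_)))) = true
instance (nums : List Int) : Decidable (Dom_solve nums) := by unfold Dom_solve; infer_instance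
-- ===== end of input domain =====

-- B replaces A's Counter-then-scan-all-keys by one online pass over nums with two sets (seen, 3*seen) and early exit; same return value.

-- ===== PORT A =====
-- the 'for n in count' loop with its two early 'return True' exits
def solveLoopA (count : PySem.Dict Int Int) : List Int → Bool
  | [] => false
  | n :: rest =>
    if n = 0 then
      -- count[0]: 0 is a key of count whenever this branch runs, so getD 0 0 = count[0] exactly
      if count.getD 0 0 > 1 then true else solveLoopA count rest
    else if count.contains (3 * n) then true else solveLoopA count rest

def solve (nums : List Int) : Bool :=
  let count := PySem.Dict.counter nums
  solveLoopA count count.keys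

-- ===== PORT B =====
def solveLoopB (seen triples : PySem.Set Int) : List Int → Bool
  | [] => false
  | x :: rest =>
    if triples.contains x || seen.contains (3 * x) then true
    else solveLoopB (seen.add x) (triples.add (3 * x)) rest

def solve_alt (nums : List Int) : Bool :=
  solveLoopB PySem.Set.empty PySem.Set.empty nums

-- ===== PRECONDITION & SPEC =====
def Spec_solve (nums : List Int) (out : Bool) : Prop := out = solve_alt nums
instance (nums : List Int) (out : Bool) : Decidable (Spec_solve nums out) := by unfold Spec_solve; infer_instance

-- ===== CLAIM (what is proved, stated in full; the proofs are below) =====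
def Claim_equal_solve : Prop := ∀ (nums : List Int), Dom_solve nums → Spec_solve nums (solve nums)

-- ===== LEMMAS AND PROOFS =====

-- the common semantic content: two zeros, or a nonzero n together with 3*n
def TripleProp (nums : List Int) : Prop :=
  2 ≤ nums.count 0 ∨ ∃ n ∈ nums, n ≠ 0 ∧ 3 * n ∈ nums

-- A's loop is an 'any' over the keys
lemma solveLoopA_eq_any (count : PySem.Dict Int Int) (keys : List Int) :
    solveLoopA count keys =
      keys.any (fun n => if n = 0 then decide (count.getD 0 0 > 1) else count.contains (3 * n)) := by
  induction keys with
  | nil => rfl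
  | cons n rest ih =>
    simp only [solveLoopA, List.any_cons, ih]
    split_ifs <;> simp_all

lemma solve_iff (nums : List Int) : solve nums = true ↔ TripleProp nums := by
  show solveLoopA _ _ = true ↔ _
  rw [solveLoopA_eq_any, PySem.Dict.keys_counter, List.any_eq_true]
  simp only [PySem.Dict.getD_counter, PySem.Dict.contains_counter, PySem.Set.mem_ofList]
  constructor
  · rintro ⟨n, hn, hp⟩
    by_cases h0 : n = 0
    · subst h0; simp at hp; left; omega
    · right
      refine ⟨n, hn, h0, ?_⟩
      simp [h0] at hp
      simpa using hp
  · rintro (h | ⟨n, hn, h0, h3⟩)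
    · refine ⟨0, List.count_pos_iff.mp (by omega), ?_⟩
      simp; omega
    · refine ⟨n, hn, ?_⟩
      simp [h0]
      simpa using h3

-- decomposition predicate tracked by B's loop: some element x of xs has, among the
-- elements before it (pref, then the part of xs before x), a y with x = 3*y or y = 3*x
def Phi (pref xs : List Int) : Prop :=
  ∃ u x v, xs = u ++ x :: v ∧ ∃ y ∈ pref ++ u, (x = 3 * y ∨ y = 3 * x)

lemma Phi_cons (pref : List Int) (x : Int) (xs : List Int) :
    Phi pref (x :: xs) ↔ (∃ y ∈ pref, x = 3 * y ∨ y = 3 * x) ∨ Phi (pref ++ [x]) xs := by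
  constructor
  · rintro ⟨u, a, v, heq, y, hy, hor⟩
    cases u with
    | nil =>
      simp at heq
      obtain ⟨rfl, rfl⟩ := heq
      left; exact ⟨y, by simpa using hy, hor⟩
    | cons b u' =>
      simp at heq
      obtain ⟨rfl, rfl⟩ := heq
      right
      exact ⟨u', a, v, rfl, y, by simpa using hy, hor⟩
  · rintro (⟨y, hy, hor⟩ | ⟨u, a, v, heq, y, hy, hor⟩)
    · exact ⟨[], x, xs, rfl, y, by simpa using hy, hor⟩
    · exact ⟨x :: u, a, v, by simp [heq], y, by simpa using hy, hor⟩

lemma ofList_append_singleton {α : Type} [BEq α] [LawfulBEq α] (l : List α) (x : α) :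
    PySem.Set.ofList (l ++ [x]) = (PySem.Set.ofList l).add x := by
  simp [PySem.Set.ofList_eq_foldl, List.foldl_append]

lemma solveLoopB_iff (xs : List Int) : ∀ (pref : List Int),
    solveLoopB (PySem.Set.ofList pref) (PySem.Set.ofList (pref.map (fun y => 3 * y))) xs = true
      ↔ Phi pref xs := by
  induction xs with
  | nil =>
    intro pref
    simp only [solveLoopB]
    constructor
    · intro h; cases h
    · rintro ⟨u, a, v, heq, _⟩; exact absurd heq (by simp)
  | cons x rest ih =>
    intro pref
    rw [Phi_cons]
    simp only [solveLoopB]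
    by_cases hc : (PySem.Set.ofList (pref.map (fun y => 3 * y))).contains x
        || (PySem.Set.ofList pref).contains (3 * x)
    · rw [if_pos hc]
      simp only [Bool.or_eq_true, PySem.Set.contains] at hc
      constructor
      · intro _
        left
        rcases hc with hc | hc
        · have : x ∈ pref.map (fun y => 3 * y) := by
            simpa [PySem.Set.mem_ofList] using hc
          obtain ⟨y, hy, hxy⟩ := List.mem_map.mp this
          exact ⟨y, hy, Or.inl hxy.symm⟩
        · have : 3 * x ∈ pref := by simpa [PySem.Set.mem_ofList] using hc
          exact ⟨3 * x, this, Or.inr rfl⟩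
      · intro _; rfl
    · rw [if_neg hc]
      have h1 : (PySem.Set.ofList pref).add x = PySem.Set.ofList (pref ++ [x]) :=
        (ofList_append_singleton pref x).symm
      have h2 : (PySem.Set.ofList (pref.map (fun y => 3 * y))).add (3 * x)
          = PySem.Set.ofList ((pref ++ [x]).map (fun y => 3 * y)) := by
        rw [List.map_append]; exact (ofList_append_singleton _ _).symm
      rw [h1, h2, ih (pref ++ [x])]
      simp only [Bool.or_eq_true, PySem.Set.contains, not_or] at hc
      constructor
      · exact Or.inr
      · rintro (⟨y, hy, hor⟩ | h)
        · exfalso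
          rcases hor with rfl | rfl
          · have hm : 3 * y ∈ PySem.Set.ofList (pref.map (fun y => 3 * y)) :=
              (PySem.Set.mem_ofList _ _).mpr (List.mem_map.mpr ⟨y, hy, rfl⟩)
            exact hc.1 (by simpa using hm)
          · have hm : 3 * x ∈ PySem.Set.ofList pref := (PySem.Set.mem_ofList _ _).mpr hy
            exact hc.2 (by simpa using hm)
        · exact h

lemma two_mem_split {a b : Int} {l : List Int} (ha : a ∈ l) (hb : b ∈ l) (hne : a ≠ b) :
    ∃ u x v, l = u ++ x :: v ∧ ((x = a ∧ b ∈ u) ∨ (x = b ∧ a ∈ u)) := by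
  induction l with
  | nil => cases ha
  | cons c t ih =>
    by_cases hca : c = a
    · subst hca
      have hbt : b ∈ t := by
        rcases List.mem_cons.mp hb with rfl | h
        · exact absurd rfl hne
        · exact h
      obtain ⟨s, t', rfl⟩ := List.mem_iff_append.mp hbt
      exact ⟨c :: s, b, t', by simp, Or.inr ⟨rfl, by simp⟩⟩
    · by_cases hcb : c = b
      · subst hcb
        have hat : a ∈ t := by
          rcases List.mem_cons.mp ha with rfl | h
          · exact absurd rfl hca
          · exact h
        obtain ⟨s, t', rfl⟩ := List.mem_iff_append.mp hat
        exact ⟨c :: s, a, t', by simp, Or.inl ⟨rfl, by simp⟩⟩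
      · have hat : a ∈ t := by
          rcases List.mem_cons.mp ha with rfl | h
          · exact absurd rfl (Ne.symm hca)
          · exact h
        have hbt : b ∈ t := by
          rcases List.mem_cons.mp hb with rfl | h
          · exact absurd rfl (Ne.symm hcb)
          · exact h
        obtain ⟨u, x, v, rfl, hor⟩ := ih hat hbt
        refine ⟨c :: u, x, v, by simp, ?_⟩
        rcases hor with ⟨rfl, h⟩ | ⟨rfl, h⟩
        · exact Or.inl ⟨rfl, by simp [h]⟩
        · exact Or.inr ⟨rfl, by simp [h]⟩

lemma count2_split {l : List Int} (h : 2 ≤ l.count 0) :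
    ∃ u v, l = u ++ 0 :: v ∧ 0 ∈ u := by
  induction l with
  | nil => simp at h
  | cons c t ih =>
    by_cases hc : c = 0
    · subst hc
      have h1 : 1 ≤ t.count 0 := by
        rw [List.count_cons] at h
        split at h
        · omega
        · simp_all
      obtain ⟨s, t', rfl⟩ := List.mem_iff_append.mp (List.count_pos_iff.mp h1)
      exact ⟨0 :: s, t', by simp, by simp⟩
    · have h2 : 2 ≤ t.count 0 := by simpa [List.count_cons, hc] using h
      obtain ⟨u, v, rfl, hu⟩ := ih h2
      exact ⟨c :: u, v, by simp, by simp [hu]⟩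

lemma solve_alt_iff (nums : List Int) : solve_alt nums = true ↔ TripleProp nums := by
  have : solve_alt nums = true ↔ Phi [] nums := by
    have := solveLoopB_iff nums []
    simpa [solve_alt, PySem.Set.empty] using this
  rw [this]
  constructor
  · rintro ⟨u, x, v, rfl, y, hy, hor⟩
    simp only [List.nil_append] at hy
    have hyl : y ∈ u ++ x :: v := List.mem_append_left _ hy
    have hxl : x ∈ u ++ x :: v := by simp
    rcases hor with rfl | rfl
    · by_cases hy0 : y = 0
      · subst hy0
        left
        simp only [List.count_append, List.count_cons]
        have : 0 < u.count 0 := List.count_pos_iff.mpr hy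
        simp; omega
      · exact Or.inr ⟨y, hyl, hy0, hxl⟩
    · by_cases hx0 : x = 0
      · subst hx0
        left
        simp only [mul_zero] at hy
        simp only [List.count_append, List.count_cons]
        have : 0 < u.count 0 := List.count_pos_iff.mpr hy
        simp; omega
      · exact Or.inr ⟨x, hxl, hx0, List.mem_append_left _ hy⟩
  · rintro (h | ⟨n, hn, h0, h3⟩)
    · obtain ⟨u, v, rfl, hu⟩ := count2_split h
      exact ⟨u, 0, v, rfl, 0, by simpa using hu, Or.inl (by ring)⟩
    · have hne : n ≠ 3 * n := by intro he; apply h0; omega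
      obtain ⟨u, x, v, rfl, hor⟩ := two_mem_split hn h3 hne
      rcases hor with ⟨hx, hmem⟩ | ⟨hx, hmem⟩
      · exact ⟨u, x, v, rfl, 3 * n, by simpa using hmem, Or.inr (by rw [hx])⟩
      · exact ⟨u, x, v, rfl, n, by simpa using hmem, Or.inl (by rw [hx])⟩

-- ===== VERDICT (by name: the statement is the Claim_ definition above) =====
theorem solve_spec : Claim_equal_solve := by
  intro nums _
  unfold Spec_solve
  rcases h : solve_alt nums with _ | _
  · rcases h2 : solve nums with _ | _
    · rfl
    · exact absurd ((solve_alt_iff nums).mpr ((solve_iff nums).mp h2)) (by simp [h])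
  · exact (solve_iff nums).mpr ((solve_alt_iff nums).mp h)
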